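-- pv_equiv track=rewrite | github.com/connorallamby/Convex-Hull-2022 | convex_hull.py | findLeftMost
-- ===== SOURCE A (Python) =====
-- from typing import List
-- from typing import Tuple
--
-- Point = Tuple[int, int]
--
-- def findLeftMost(inputList: List[Point]):
--     # index where leftmost is found
--     currentRight = 0
--     # x value of leftmose
--     leftMost = inputList[0][0]
--     for i in range(len(inputList)):
--         if inputList[i][0] <= leftMost:
--             leftMost = inputList[i][0]
--             currentRight = i
--
--     return currentRight, leftMost
-- ===== SOURCE B (Python) =====
-- def findLeftMost(inputList):
--     # smallest x value, then the last index at which it occurs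
--     leftMost = min(p[0] for p in inputList)
--     currentRight = max(i for i in range(len(inputList)) if inputList[i][0] == leftMost)
--     return currentRight, leftMost
-- ===== Notes on version B (the rewrite author's own statement) =====
-- stated objective: idiomatic
-- what changed: Replaces the single running (index, value) tracking loop by two builtin passes: min() over the x values, then max() over the indices where that minimum occurs (reproducing A's last-index-on-ties).
import Mathlib
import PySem

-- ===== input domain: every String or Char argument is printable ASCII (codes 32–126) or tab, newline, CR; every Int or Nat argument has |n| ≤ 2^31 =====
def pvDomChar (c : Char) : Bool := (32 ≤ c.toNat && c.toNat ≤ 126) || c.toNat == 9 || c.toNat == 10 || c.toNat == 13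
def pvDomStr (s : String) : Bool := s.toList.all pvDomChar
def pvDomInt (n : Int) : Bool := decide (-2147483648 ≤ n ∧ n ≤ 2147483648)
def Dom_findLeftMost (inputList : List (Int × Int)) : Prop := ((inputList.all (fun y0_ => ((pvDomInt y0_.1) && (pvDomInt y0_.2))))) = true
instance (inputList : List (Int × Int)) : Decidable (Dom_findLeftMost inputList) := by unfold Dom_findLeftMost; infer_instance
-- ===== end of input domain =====

-- B replaces A's single running (index, value) tracking loop by two builtin passes
-- (min over x values, then max over the indices attaining it); same O(n) cost, more idiomatic.


-- ===== PORT A =====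
def findLeftMost (inputList : List (Int × Int)) : Int × Int :=
  -- currentRight = 0; leftMost = inputList[0][0]  (pyGetD default unreachable under Pre_)
  let init : Int × Int := (0, (PySem.List.pyGetD inputList 0 (0, 0)).1)
  (PySem.List.pyRange 0 inputList.length 1).foldl
    (fun s i =>
      if (PySem.List.pyGetD inputList i (0, 0)).1 ≤ s.2 then
        (i, (PySem.List.pyGetD inputList i (0, 0)).1)
      else s)
    init

-- ===== PORT B =====
def findLeftMost_alt (inputList : List (Int × Int)) : Int × Int :=
  -- leftMost = min(p[0] for p in inputList)  (getD default unreachable under Pre_)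
  let leftMost : Int := (PySem.List.min? (inputList.map Prod.fst) (fun x => x)).getD 0
  -- currentRight = max(i for i in range(len(inputList)) if inputList[i][0] == leftMost)
  let currentRight : Int :=
    (PySem.List.max?
      ((PySem.List.pyRange 0 inputList.length 1).filter
        (fun i => (PySem.List.pyGetD inputList i (0, 0)).1 == leftMost))
      (fun x => x)).getD 0
  (currentRight, leftMost)

-- ===== PRECONDITION & SPEC =====
-- A raises IndexError (and B ValueError) on the empty list: Pre_ excludes exactly it.
def Pre_findLeftMost (inputList : List (Int × Int)) : Prop := inputList ≠ []
instance (inputList : List (Int × Int)) : Decidable (Pre_findLeftMost inputList) := by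
  unfold Pre_findLeftMost; infer_instance
def pvWitness_findLeftMost : (List (Int × Int)) := [(2, 1), (0, 3), (0, 5)]

def Spec_findLeftMost (inputList : List (Int × Int)) (out : Int × Int) : Prop :=
  out = findLeftMost_alt inputList
instance (inputList : List (Int × Int)) (out : Int × Int) : Decidable (Spec_findLeftMost inputList out) := by
  unfold Spec_findLeftMost; infer_instance

-- ===== CLAIM (what is proved, stated in full; the proofs are below) =====
def Claim_equal_findLeftMost : Prop := ∀ (inputList : List (Int × Int)), Dom_findLeftMost inputList → Pre_findLeftMost inputList → Spec_findLeftMost inputList (findLeftMost inputList)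

-- ===== LEMMAS AND PROOFS =====

lemma pyRange01 : PySem.List.pyRange 0 1 1 = [0] := by decide

-- A on a singleton
lemma A_single (x : Int × Int) : findLeftMost [x] = (0, x.1) := by
  simp [findLeftMost, pyRange01]

-- B on a singleton
lemma B_single (x : Int × Int) : findLeftMost_alt [x] = (0, x.1) := by
  simp [findLeftMost_alt, pyRange01, PySem.List.min?, PySem.List.max?]

-- lookups in the appended list agree with lookups in the prefix on prefix indices
lemma getD_append_lt (xs : List (Int × Int)) (x : Int × Int) (i : Int)
    (h0 : 0 ≤ i) (h1 : i < (xs.length : Int)) :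
    PySem.List.pyGetD (xs ++ [x]) i (0, 0) = PySem.List.pyGetD xs i (0, 0) := by
  rw [PySem.List.pyGetD_eq_getElem (xs ++ [x]) (0, 0) h0 (by simp; omega),
      PySem.List.pyGetD_eq_getElem xs (0, 0) h0 (by simpa using h1)]
  exact List.getElem_append_left (by omega)

lemma getD_append_last (xs : List (Int × Int)) (x : Int × Int) :
    PySem.List.pyGetD (xs ++ [x]) (xs.length : Int) (0, 0) = x := by
  rw [PySem.List.pyGetD_eq_getElem (xs ++ [x]) (0, 0) (by positivity) (by simp)]
  simp

-- A's step recurrence on appending one point (xs nonempty)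
lemma A_step (xs : List (Int × Int)) (x : Int × Int) (h : xs ≠ []) :
    findLeftMost (xs ++ [x]) =
      if x.1 ≤ (findLeftMost xs).2 then ((xs.length : Int), x.1) else findLeftMost xs := by
  obtain ⟨y, ys, rfl⟩ := List.exists_cons_of_ne_nil h
  unfold findLeftMost
  have hlen : (((y :: ys) ++ [x]).length : Int) = ((y :: ys).length : Int) + 1 := by simp
  rw [hlen, PySem.List.pyRange_one_succ_right (by positivity), List.foldl_append]
  have h0 : PySem.List.pyGetD ((y :: ys) ++ [x]) 0 (0, 0) = PySem.List.pyGetD (y :: ys) 0 (0, 0) := by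
    rw [List.cons_append, PySem.List.pyGetD_zero_cons, PySem.List.pyGetD_zero_cons]
  rw [h0]
  have hcongr :
      (PySem.List.pyRange 0 ((y :: ys).length : Int) 1).foldl
        (fun s i =>
          if (PySem.List.pyGetD ((y :: ys) ++ [x]) i (0, 0)).1 ≤ s.2 then
            (i, (PySem.List.pyGetD ((y :: ys) ++ [x]) i (0, 0)).1)
          else s)
        (0, (PySem.List.pyGetD (y :: ys) 0 (0, 0)).1) =
      (PySem.List.pyRange 0 ((y :: ys).length : Int) 1).foldl
        (fun s i =>
          if (PySem.List.pyGetD (y :: ys) i (0, 0)).1 ≤ s.2 then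
            (i, (PySem.List.pyGetD (y :: ys) i (0, 0)).1)
          else s)
        (0, (PySem.List.pyGetD (y :: ys) 0 (0, 0)).1) := by
    apply PySem.List.foldl_congr_mem
    intro acc i hi
    obtain ⟨hi0, hi1⟩ := PySem.List.mem_pyRange_one.1 hi
    rw [getD_append_lt _ _ _ hi0 hi1]
  rw [hcongr, List.foldl_cons, List.foldl_nil, getD_append_last]

-- max over a list ending in its maximum
lemma max?_id_append_last (L : List Int) (a : Int) (hall : ∀ y ∈ L, y ≤ a) :
    PySem.List.max? (L ++ [a]) (fun z => z) = some a := by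
  cases L with
  | nil => simp [PySem.List.max?]
  | cons b t =>
    rw [List.cons_append, PySem.List.max?_id_cons]
    have hb : b ≤ a := hall b (by simp)
    have ht : ∀ y ∈ t, y ≤ a := fun y hy => hall y (by simp [hy])
    rw [List.foldl_append, List.foldl_cons, List.foldl_nil]
    have : t.foldl max b ≤ a := by
      rcases PySem.List.foldl_max_mem t b with heq | hmem
      · rw [heq]; exact hb
      · exact ht _ hmem
    simp [max_eq_right this]

-- B's step recurrence on appending one point (xs nonempty)
lemma B_step (xs : List (Int × Int)) (x : Int × Int) (h : xs ≠ []) :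
    findLeftMost_alt (xs ++ [x]) =
      if x.1 ≤ (findLeftMost_alt xs).2 then ((xs.length : Int), x.1) else findLeftMost_alt xs := by
  obtain ⟨y, ys, rfl⟩ := List.exists_cons_of_ne_nil h
  unfold findLeftMost_alt
  -- the two minima
  have hmap : ((y :: ys) ++ [x]).map Prod.fst = y.1 :: (ys.map Prod.fst ++ [x.1]) := by simp
  have hmin_old : PySem.List.min? ((y :: ys).map Prod.fst) (fun z => z)
      = some ((ys.map Prod.fst).foldl min y.1) := by
    rw [List.map_cons, PySem.List.min?_id_cons]
  have hmin_new : PySem.List.min? (((y :: ys) ++ [x]).map Prod.fst) (fun z => z)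
      = some (min ((ys.map Prod.fst).foldl min y.1) x.1) := by
    rw [hmap, PySem.List.min?_id_cons, List.foldl_append, List.foldl_cons, List.foldl_nil]
  set m : Int := (ys.map Prod.fst).foldl min y.1 with hm
  rw [hmin_old, hmin_new]
  simp only [Option.getD_some]
  have hlen : (((y :: ys) ++ [x]).length : Int) = ((y :: ys).length : Int) + 1 := by simp
  rw [hlen, PySem.List.pyRange_one_succ_right (by positivity), List.filter_append]
  by_cases hc : x.1 ≤ m
  · -- new minimum is x.1, and the last index qualifies
    have hmineq : min m x.1 = x.1 := min_eq_right hc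
    rw [if_pos (by simpa [hmin_old] using hc), hmineq]
    have hlast := getD_append_last (y :: ys) x
    have hpn : (List.filter
        (fun i => (PySem.List.pyGetD ((y :: ys) ++ [x]) i (0, 0)).1 == x.1)
        [((y :: ys).length : Int)]) = [((y :: ys).length : Int)] := by
      simp only [List.filter_cons, List.filter_nil, hlast]
      simp
    rw [hpn]
    have hall : ∀ i ∈ (PySem.List.pyRange 0 ((y :: ys).length : Int) 1).filter
        (fun i => (PySem.List.pyGetD ((y :: ys) ++ [x]) i (0, 0)).1 == x.1),
        i ≤ ((y :: ys).length : Int) := by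
      intro i hi
      have := (PySem.List.mem_pyRange_one.1 (List.mem_of_mem_filter hi)).2
      omega
    rw [max?_id_append_last _ _ hall]
    rfl
  · -- minimum unchanged; the last index does not qualify
    have hmineq : min m x.1 = m := min_eq_left (le_of_not_ge hc)
    rw [if_neg (by simpa [hmin_old] using hc), hmineq]
    have hlast := getD_append_last (y :: ys) x
    have hne' : x.1 ≠ m := fun he => hc (le_of_eq he)
    have hpn : (List.filter
        (fun i => (PySem.List.pyGetD ((y :: ys) ++ [x]) i (0, 0)).1 == m)
        [((y :: ys).length : Int)]) = [] := by
      simp only [List.filter_cons, List.filter_nil, hlast]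
      simp [hne']
    rw [hpn, List.append_nil]
    have hfc : (PySem.List.pyRange 0 ((y :: ys).length : Int) 1).filter
        (fun i => (PySem.List.pyGetD ((y :: ys) ++ [x]) i (0, 0)).1 == m)
      = (PySem.List.pyRange 0 ((y :: ys).length : Int) 1).filter
        (fun i => (PySem.List.pyGetD (y :: ys) i (0, 0)).1 == m) := by
      apply List.filter_congr
      intro i hi
      obtain ⟨hi0, hi1⟩ := PySem.List.mem_pyRange_one.1 hi
      rw [getD_append_lt _ _ _ hi0 hi1]
    rw [hfc]

lemma AB_eq (inputList : List (Int × Int)) (h : inputList ≠ []) :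
    findLeftMost inputList = findLeftMost_alt inputList := by
  induction inputList using List.reverseRecOn with
  | nil => exact absurd rfl h
  | append_singleton xs x ih =>
    cases xs with
    | nil => rw [List.nil_append, A_single, B_single]
    | cons y ys =>
      have hne : y :: ys ≠ [] := by simp
      rw [A_step _ _ hne, B_step _ _ hne, ih hne]

-- ===== VERDICT (by name: the statement is the Claim_ definition above) =====
theorem findLeftMost_spec : Claim_equal_findLeftMost := by
  intro l _ hpre
  unfold Spec_findLeftMost
  exact AB_eq l hpre
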